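-- pv_equiv track=rewrite | github.com/huiyanglu/LearnCodewars | 5 kyu/5kyu_slogan_maker.py | slogan_maker
-- ===== SOURCE A (Python) =====
-- import itertools
--
-- def slogan_maker(a):
--     a2 = list(set(a))
--     a2.sort(key=a.index) # 字符串去重后按原顺序排列
--     x = []
--     result = list(itertools.permutations(a2, len(a2))) # 字符串排列组合考虑顺序
--     for i in range(0,len(result)):
--         x.append(' '.join(result[i]))
--     return x
-- ===== SOURCE B (Python) =====
-- def slogan_maker(a):
--     # dedup keeping first-occurrence order in one pass
--     b2 = list(dict.fromkeys(a))
--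
--     def perm(rest):
--         # all orderings of rest, in itertools order: pick index i left-to-right,
--         # prepend rest[i] to each ordering of the remaining words
--         if not rest:
--             return [[]]
--         out = []
--         for i in range(len(rest)):
--             for p in perm(rest[:i] + rest[i + 1:]):
--                 out.append([rest[i]] + p)
--         return out
--
--     return [' '.join(p) for p in perm(b2)]
-- ===== Notes on version B (the rewrite author's own statement) =====
-- stated objective: alternative
-- what changed: Dedup is a single dict.fromkeys pass instead of set() plus sort(key=a.index), and the permutations are produced by an explicit recursive index-selection helper instead of itertools.permutations followed by an index loop that joins tuples.
import Mathlib
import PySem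

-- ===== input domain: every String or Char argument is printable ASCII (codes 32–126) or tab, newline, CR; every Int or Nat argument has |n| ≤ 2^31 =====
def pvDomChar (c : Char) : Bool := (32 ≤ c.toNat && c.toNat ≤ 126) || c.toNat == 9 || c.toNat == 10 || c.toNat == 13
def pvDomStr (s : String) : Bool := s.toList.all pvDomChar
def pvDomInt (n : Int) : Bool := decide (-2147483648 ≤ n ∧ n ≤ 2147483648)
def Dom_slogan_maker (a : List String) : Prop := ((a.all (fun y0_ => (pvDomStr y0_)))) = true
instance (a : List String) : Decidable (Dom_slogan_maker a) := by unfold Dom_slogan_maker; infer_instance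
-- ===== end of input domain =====

-- B replaces set()+sort(key=a.index) by a one-pass ordered dedup and itertools.permutations
-- plus a join loop by a recursive index-selection generator with a final map; same return value.

-- ===== PORT A =====
-- a.index(x) never raises here (every element of set(a) is in a), so the key is rendered
-- totally as (index? a x).getD 0, exact on all reachable inputs.
def slogan_maker (a : List String) : List String :=
  let a2 := PySem.List.sorted (PySem.Set.ofList a) (fun x => (PySem.List.index? a x).getD 0)
  let result := PySem.List.permutations a2 a2.length
  let x := (PySem.List.pyRange 0 (PySem.List.len result)).foldl
      (fun acc i => acc ++ [PySem.Str.join " " (PySem.List.pyGetD result i [])]) []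
  x

-- ===== PORT B =====
-- rest[:i] + rest[i+1:] is List.take i ++ List.drop (i+1) (exact for 0 ≤ i < len);
-- rest[i] is rendered totally as getD (the dite guard only makes the recursion total:
-- i ∈ range(len rest) always satisfies it).
def permB (rest : List String) : List (List String) :=
  if _h : rest = [] then [[]]
  else
    (List.range rest.length).flatMap fun i =>
      if h : i < rest.length then
        (permB (List.take i rest ++ List.drop (i + 1) rest)).map
          (fun p => rest.getD i "" :: p)
      else []
termination_by rest.length
decreasing_by
  simp only [List.length_append, List.length_take, List.length_drop]
  omega

def slogan_maker_alt (a : List String) : List String :=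
  (permB (PySem.List.dedup a)).map (fun p => PySem.Str.join " " p)

-- ===== PRECONDITION & SPEC =====
def Spec_slogan_maker (a : List String) (out : List String) : Prop := out = slogan_maker_alt a
instance (a : List String) (out : List String) : Decidable (Spec_slogan_maker a out) := by unfold Spec_slogan_maker; infer_instance

-- ===== CLAIM (what is proved, stated in full; the proofs are below) =====
def Claim_equal_slogan_maker : Prop := ∀ (a : List String), Dom_slogan_maker a → Spec_slogan_maker a (slogan_maker a)

-- ===== LEMMAS AND PROOFS =====

-- every element of a has a first index, below a.length
lemma key_lt_len (l : List String) (x : String) (hx : x ∈ l) :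
    ((PySem.List.index? l x).getD 0) < l.length := by
  obtain ⟨k, hk⟩ := (PySem.List.index?_isSome_iff l x).mpr hx |> Option.isSome_iff_exists.mp
  obtain ⟨hlt, -, -⟩ := PySem.List.getElem_of_index?_eq_some hk
  rw [hk]
  exact hlt

-- list(set(a)) is first-occurrence order here, so its a.index keys are already nondecreasing
lemma pairwise_ofList_key (a : List String) :
    (PySem.Set.ofList a).Pairwise
      (fun x y => ((PySem.List.index? a x).getD 0) ≤ ((PySem.List.index? a y).getD 0)) := by
  induction a using List.reverseRecOn with
  | nil => simp [PySem.Set.ofList, PySem.Set.empty]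
  | append_singleton l y ih =>
    have hof : PySem.Set.ofList (l ++ [y]) = PySem.Set.add (PySem.Set.ofList l) y := by
      simp [PySem.Set.ofList, List.foldl_append]
    rw [hof]
    by_cases hy : y ∈ l
    · have hadd : PySem.Set.add (PySem.Set.ofList l) y = PySem.Set.ofList l := by
        simp [PySem.Set.add, PySem.Set.mem_ofList, hy]
      rw [hadd]
      refine ih.imp_of_mem ?_
      intro x z hx hz h
      rw [PySem.List.index?_append_of_mem [y] ((PySem.Set.mem_ofList l x).mp hx),
          PySem.List.index?_append_of_mem [y] ((PySem.Set.mem_ofList l z).mp hz)]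
      exact h
    · have hadd : PySem.Set.add (PySem.Set.ofList l) y = PySem.Set.ofList l ++ [y] := by
        simp [PySem.Set.add, PySem.Set.mem_ofList, hy]
      rw [hadd, List.pairwise_append]
      refine ⟨ih.imp_of_mem ?_, List.pairwise_singleton _ _, ?_⟩
      · intro x z hx hz h
        rw [PySem.List.index?_append_of_mem [y] ((PySem.Set.mem_ofList l x).mp hx),
            PySem.List.index?_append_of_mem [y] ((PySem.Set.mem_ofList l z).mp hz)]
        exact h
      · intro x hx z hz
        simp only [List.mem_singleton] at hz
        have hxl : x ∈ l := (PySem.Set.mem_ofList l x).mp hx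
        rw [hz, PySem.List.index?_append_of_mem [y] hxl,
            PySem.List.index?_append_singleton_self l y hy]
        simpa using le_of_lt (key_lt_len l x hxl)

-- B's recursive generator produces exactly itertools.permutations(xs, len(xs))
lemma permB_eq : ∀ (n : Nat) (xs : List String), xs.length = n →
    permB xs = PySem.List.permutations xs n := by
  intro n
  induction n with
  | zero =>
    intro xs h
    rw [List.length_eq_zero_iff] at h
    subst h
    rw [permB]
    simp [PySem.List.permutations]
  | succ n ih =>
    intro xs h
    have hne : xs ≠ [] := by intro e; subst e; simp at h
    rw [permB, dif_neg hne]
    simp only [PySem.List.permutations]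
    rw [List.flatMap_def, List.flatMap_def]
    congr 1
    apply List.map_congr_left
    intro i hi
    have hlt : i < xs.length := List.mem_range.mp hi
    rw [dif_pos hlt]
    have hget : xs[i]? = some xs[i] := List.getElem?_eq_getElem hlt
    simp only [hget]
    have herase : List.take i xs ++ List.drop (i + 1) xs = xs.eraseIdx i :=
      (List.eraseIdx_eq_take_drop_succ xs i).symm
    rw [herase, ih (xs.eraseIdx i) (by simp [List.length_eraseIdx_of_lt hlt, h]),
        List.getD_eq_getElem xs "" hlt]

-- ===== VERDICT (by name: the statement is the Claim_ definition above) =====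
theorem slogan_maker_spec : Claim_equal_slogan_maker := by
  intro a _
  unfold Spec_slogan_maker slogan_maker slogan_maker_alt
  have hkey : PySem.List.sorted (PySem.Set.ofList a)
      (fun x => (PySem.List.index? a x).getD 0) = PySem.List.dedup a := by
    rw [PySem.List.dedup_eq_ofList]
    exact PySem.List.sorted_eq_self_of_pairwise _ _ (pairwise_ofList_key a)
  simp only [hkey]
  rw [PySem.List.foldl_pyRange_pyGetD _ [] (fun acc t => acc ++ [PySem.Str.join " " t]) []
        (le_refl 0)]
  simp only [Int.toNat_zero, List.drop_zero]
  rw [PySem.List.foldl_append_singleton_eq_map, List.nil_append,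
      permB_eq (PySem.List.dedup a).length (PySem.List.dedup a) rfl]
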